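-- pv_equiv track=rewrite | github.com/TavisJiang/Transform_factory | latex2kb/src/latex2kb/converter.py | _detect_label_kind
-- ===== SOURCE A (Python) =====
-- def _detect_label_kind(key: str) -> str:
--     """Detect label kind from its prefix."""
--     prefixes = {
--         'fig:': 'fig',
--         'tab:': 'tab',
--         'eq:': 'eq',
--         'sec:': 'sec',
--         'subsec:': 'subsec',
--         'chap:': 'chap',
--         'thm:': 'thm',
--         'lem:': 'thm',
--         'prop:': 'thm',
--         'def:': 'thm',
--         'cor:': 'thm',
--         'alg:': 'alg',
--     }
--     for prefix, kind in prefixes.items():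
--         if key.startswith(prefix):
--             return kind
--     return 'sec'  # default
-- ===== SOURCE B (Python) =====
-- def _detect_label_kind(key: str) -> str:
--     """Detect label kind from its prefix."""
--     i = key.find(':')
--     if i < 0:
--         return 'sec'  # no colon: no prefix can match
--     match key[:i]:
--         case 'fig':
--             return 'fig'
--         case 'tab':
--             return 'tab'
--         case 'eq':
--             return 'eq'
--         case 'sec':
--             return 'sec'
--         case 'subsec':
--             return 'subsec'
--         case 'chap':
--             return 'chap'
--         case 'thm' | 'lem' | 'prop' | 'def' | 'cor':
--             return 'thm'
--         case 'alg':
--             return 'alg'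
--         case _:
--             return 'sec'
-- ===== Notes on version B (the rewrite author's own statement) =====
-- stated objective: idiomatic
-- what changed: Replaces the linear startswith scan over all 12 prefixes with locating the first colon once via key.find(':'), slicing the head off, and dispatching on it with a match/case chain (grouped cases for the five 'thm' words); no loop over prefixes remains.
import Mathlib
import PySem

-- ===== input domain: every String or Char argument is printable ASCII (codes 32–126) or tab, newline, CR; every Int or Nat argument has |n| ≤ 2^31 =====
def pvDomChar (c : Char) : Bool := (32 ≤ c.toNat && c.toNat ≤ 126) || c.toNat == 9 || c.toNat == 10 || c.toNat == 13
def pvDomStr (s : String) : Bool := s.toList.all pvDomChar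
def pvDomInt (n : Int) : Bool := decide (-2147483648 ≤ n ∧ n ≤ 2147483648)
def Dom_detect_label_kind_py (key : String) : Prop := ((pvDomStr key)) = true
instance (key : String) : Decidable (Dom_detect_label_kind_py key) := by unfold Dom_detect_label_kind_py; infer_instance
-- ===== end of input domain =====

-- B replaces A's linear startswith scan over the 12-entry dict by locating the first colon with
-- str.find, slicing the head off once, and dispatching on it with a match/case chain (idiomatic).

-- ===== PORT A =====
-- A iterates over the dict's items in insertion order and returns the kind of the first
-- prefix the key starts with; the early-return loop is ported as List.find?.
def detect_label_kind_py (key : String) : String :=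
  let prefixes : List (String × String) :=
    [("fig:", "fig"), ("tab:", "tab"), ("eq:", "eq"), ("sec:", "sec"),
     ("subsec:", "subsec"), ("chap:", "chap"), ("thm:", "thm"), ("lem:", "thm"),
     ("prop:", "thm"), ("def:", "thm"), ("cor:", "thm"), ("alg:", "alg")]
  match prefixes.find? (fun pk => PySem.Str.startswith key pk.1) with
  | some pk => pk.2
  | none => "sec"

-- ===== PORT B =====
-- B: i = key.find(':'); early default when i < 0; otherwise match on the slice key[:i].
-- Python's match/case on string literals is ported as the equivalent literal-equality chain
-- (a grouped case 'thm' | 'lem' | … becomes one disjunction).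
def detect_label_kind_py_alt (key : String) : String :=
  let i := PySem.Str.find key ":"
  if i < 0 then "sec"
  else
    let head := PySem.Str.slice key none (some i)
    if head = "fig" then "fig"
    else if head = "tab" then "tab"
    else if head = "eq" then "eq"
    else if head = "sec" then "sec"
    else if head = "subsec" then "subsec"
    else if head = "chap" then "chap"
    else if head = "thm" ∨ head = "lem" ∨ head = "prop" ∨ head = "def" ∨ head = "cor" then "thm"
    else if head = "alg" then "alg"
    else "sec"

-- ===== PRECONDITION & SPEC =====
def Spec_detect_label_kind_py (key : String) (out : String) : Prop := out = detect_label_kind_py_alt key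
instance (key : String) (out : String) : Decidable (Spec_detect_label_kind_py key out) := by unfold Spec_detect_label_kind_py; infer_instance

-- ===== CLAIM (what is proved, stated in full; the proofs are below) =====
def Claim_equal_detect_label_kind_py : Prop := ∀ (key : String), Dom_detect_label_kind_py key → Spec_detect_label_kind_py key (detect_label_kind_py key)

-- ===== LEMMAS AND PROOFS =====

-- startswith as a decided prefix proposition
theorem pv_sw_eq (cs p : List Char) :
    PySem.Chars.startswith cs p = decide (p <+: cs) := by
  by_cases h : p <+: cs
  · simp [(PySem.Chars.startswith_iff cs p).mpr h, h]
  · simp only [h, decide_false]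
    rw [← Bool.not_eq_true, PySem.Chars.startswith_iff]
    exact h

theorem pv_takeWhile_colon (w rest : List Char) (hw : ':' ∉ w) :
    (w ++ ':' :: rest).takeWhile (fun c => c ≠ ':') = w := by
  induction w with
  | nil => simp
  | cons a t ih =>
    have ha : a ≠ ':' := fun h => hw (by simp [h])
    have ht : ':' ∉ t := fun h => hw (List.mem_cons_of_mem _ h)
    rw [List.cons_append, List.takeWhile_cons, if_pos (by simp [ha]), ih ht]

theorem pv_drop_head (cs : List Char)
    (h : cs.dropWhile (fun c => (c ≠ ':' : Bool)) ≠ []) :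
    ∃ rest, cs.dropWhile (fun c => (c ≠ ':' : Bool)) = ':' :: rest := by
  induction cs with
  | nil => simp at h
  | cons a t ih =>
    by_cases ha : a = ':'
    · exact ⟨t, by simp [ha]⟩
    · rw [List.dropWhile_cons] at h ⊢
      simp only [ha, ne_eq, not_false_iff, decide_true] at h ⊢
      exact ih h

-- a colon-terminated, colon-free word is a prefix of cs iff it is exactly the head before
-- the first colon of cs and a colon exists
theorem pv_prefix_colon_iff (w cs : List Char) (hw : ':' ∉ w) :
    (w ++ [':']) <+: cs ↔
      (cs.takeWhile (fun c => (c ≠ ':' : Bool)) = w ∧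
       (cs.takeWhile (fun c => (c ≠ ':' : Bool))).length < cs.length) := by
  constructor
  · rintro ⟨rest, hpre⟩
    have hcs : cs = w ++ ':' :: rest := by
      rw [← hpre]; simp
    subst hcs
    refine ⟨pv_takeWhile_colon w rest hw, ?_⟩
    rw [pv_takeWhile_colon w rest hw]
    simp
  · rintro ⟨hh, hl⟩
    have hsplit := List.takeWhile_append_dropWhile
      (p := fun c => (c ≠ ':' : Bool)) (l := cs)
    have hne : cs.dropWhile (fun c => (c ≠ ':' : Bool)) ≠ [] := by
      intro h0
      rw [h0, List.append_nil] at hsplit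
      rw [hsplit] at hl
      omega
    obtain ⟨rest, hrest⟩ := pv_drop_head cs hne
    exact ⟨rest, by rw [← hsplit, hh, hrest]; simp⟩

-- one startswith test of A as a test on the head before the first colon
theorem pv_condS (key : String) (w : List Char) (p : String)
    (hp : p.toList = w ++ [':']) (hw : ':' ∉ w) :
    PySem.Str.startswith key p =
      (decide (key.toList.takeWhile (fun c => (c ≠ ':' : Bool)) = w) &&
       decide ((key.toList.takeWhile (fun c => (c ≠ ':' : Bool))).length < key.toList.length)) := by
  have : PySem.Str.startswith key p = PySem.Chars.startswith key.toList p.toList := by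
    simp
  rw [this, hp, pv_sw_eq, ← Bool.decide_and]
  exact decide_eq_decide.mpr (pv_prefix_colon_iff w key.toList hw)

-- key.find(':') is -1 when the key is colon-free, else the length of the head before the first colon
theorem pv_find_colon (cs : List Char) :
    PySem.Chars.find cs [':'] =
      if (cs.takeWhile (fun c => (c ≠ ':' : Bool))).length = cs.length then (-1 : Int)
      else ((cs.takeWhile (fun c => (c ≠ ':' : Bool))).length : Int) := by
  set t := cs.takeWhile (fun c => (c ≠ ':' : Bool)) with ht
  have htpre : t <+: cs := List.takeWhile_prefix _
  have htnc : ':' ∉ t := by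
    intro hm
    have := List.mem_takeWhile_imp (l := cs) (p := fun c => (c ≠ ':' : Bool)) (ht ▸ hm)
    simp at this
  by_cases hcol : t.length = cs.length
  · -- colon-free: takeWhile kept everything, find misses
    have hteq : t = cs := List.IsPrefix.eq_of_length htpre hcol
    have hnm : ':' ∉ cs := hteq ▸ htnc
    rw [if_pos hcol, PySem.Chars.find_eq_neg_one_iff]
    intro hinf
    exact hnm ((List.singleton_infix_iff ':' cs).mp hinf)
  · have hlt : t.length < cs.length := Nat.lt_of_le_of_ne htpre.length_le hcol
    have hwpre : (t ++ [':']) <+: cs := (pv_prefix_colon_iff t cs htnc).mpr ⟨rfl, hlt⟩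
    have hdropt : [':'] <+: cs.drop t.length := by
      obtain ⟨r, hr⟩ := hwpre
      exact ⟨r, by rw [← hr, List.append_assoc, List.drop_left]⟩
    have hinf : [':'] <:+: cs := by
      obtain ⟨r, hr⟩ := hwpre
      exact ⟨t, r, hr⟩
    have hpos : 0 ≤ PySem.Chars.find cs [':'] := (PySem.Chars.find_nonneg_iff cs [':']).mpr hinf
    obtain ⟨hpre, hmin⟩ := PySem.Chars.find_spec hpos
    set n := (PySem.Chars.find cs [':']).toNat with hn
    have h1 : ¬ t.length < n := fun hc => hmin t.length hc hdropt
    have h2 : ¬ n < t.length := by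
      intro hc
      obtain ⟨r, hr⟩ := hpre
      have hcsn : cs[n]'(lt_trans hc hlt) = ':' := by
        have h0 : (cs.drop n)[0]'(by rw [← hr]; simp) = ':' := by
          simp [← hr]
        simpa using h0
      have hgt : t[n]'hc = cs[n]'(lt_trans hc hlt) := htpre.getElem hc
      have hmem : t[n]'hc ∈ t := List.getElem_mem _
      rw [hgt, hcsn] at hmem
      exact htnc hmem
    have hne : n = t.length := by omega
    rw [if_neg hcol, ← Int.toNat_of_nonneg hpos, ← hn, hne]

theorem detect_label_kind_eq (key : String) :
    detect_label_kind_py key = detect_label_kind_py_alt key := by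
  unfold detect_label_kind_py detect_label_kind_py_alt
  simp only [List.find?]
  rw [pv_condS key ['f','i','g'] "fig:" (by decide) (by decide),
      pv_condS key ['t','a','b'] "tab:" (by decide) (by decide),
      pv_condS key ['e','q'] "eq:" (by decide) (by decide),
      pv_condS key ['s','e','c'] "sec:" (by decide) (by decide),
      pv_condS key ['s','u','b','s','e','c'] "subsec:" (by decide) (by decide),
      pv_condS key ['c','h','a','p'] "chap:" (by decide) (by decide),
      pv_condS key ['t','h','m'] "thm:" (by decide) (by decide),
      pv_condS key ['l','e','m'] "lem:" (by decide) (by decide),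
      pv_condS key ['p','r','o','p'] "prop:" (by decide) (by decide),
      pv_condS key ['d','e','f'] "def:" (by decide) (by decide),
      pv_condS key ['c','o','r'] "cor:" (by decide) (by decide),
      pv_condS key ['a','l','g'] "alg:" (by decide) (by decide)]
  have hfind : PySem.Str.find key ":" = PySem.Chars.find key.toList [':'] := by
    simp
  rw [hfind, pv_find_colon key.toList]
  set h := key.toList.takeWhile (fun c => (c ≠ ':' : Bool)) with hdef
  have hpre : h <+: key.toList := hdef ▸ List.takeWhile_prefix _
  by_cases hcol : h.length = key.toList.length
  · -- no colon: A's tests all fail, B takes the i < 0 branch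
    simp [hcol]
  · have hlt : h.length < key.toList.length := Nat.lt_of_le_of_ne hpre.length_le hcol
    have hne0 : ¬ ((h.length : Int) < 0) := by omega
    simp only [hcol, if_false, hne0, hlt, decide_true, Bool.and_true]
    -- B's sliced head is exactly h
    have hheadL : (PySem.Str.slice key none (some (h.length : Int))).toList = h := by
      rw [PySem.Str.toList_slice, PySem.Chars.slice_eq_listSlice,
          PySem.List.slice_to_natCast]
      exact (List.prefix_iff_eq_take.mp hpre).symm
    set head := PySem.Str.slice key none (some (h.length : Int)) with hh
    by_cases h1 : h = ['f','i','g']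
    · have : head = "fig" := String.toList_inj.mp (by rw [hheadL, h1]; decide)
      simp [h1, this]
    by_cases h2 : h = ['t','a','b']
    · have : head = "tab" := String.toList_inj.mp (by rw [hheadL, h2]; decide)
      simp [h2, this]
    by_cases h3 : h = ['e','q']
    · have : head = "eq" := String.toList_inj.mp (by rw [hheadL, h3]; decide)
      simp [h3, this]
    by_cases h4 : h = ['s','e','c']
    · have : head = "sec" := String.toList_inj.mp (by rw [hheadL, h4]; decide)
      simp [h4, this]
    by_cases h5 : h = ['s','u','b','s','e','c']
    · have : head = "subsec" := String.toList_inj.mp (by rw [hheadL, h5]; decide)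
      simp [h5, this]
    by_cases h6 : h = ['c','h','a','p']
    · have : head = "chap" := String.toList_inj.mp (by rw [hheadL, h6]; decide)
      simp [h6, this]
    by_cases h7 : h = ['t','h','m']
    · have : head = "thm" := String.toList_inj.mp (by rw [hheadL, h7]; decide)
      simp [h7, this]
    by_cases h8 : h = ['l','e','m']
    · have : head = "lem" := String.toList_inj.mp (by rw [hheadL, h8]; decide)
      simp [h8, this]
    by_cases h9 : h = ['p','r','o','p']
    · have : head = "prop" := String.toList_inj.mp (by rw [hheadL, h9]; decide)
      simp [h9, this]
    by_cases h10 : h = ['d','e','f']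
    · have : head = "def" := String.toList_inj.mp (by rw [hheadL, h10]; decide)
      simp [h10, this]
    by_cases h11 : h = ['c','o','r']
    · have : head = "cor" := String.toList_inj.mp (by rw [hheadL, h11]; decide)
      simp [h11, this]
    by_cases h12 : h = ['a','l','g']
    · have : head = "alg" := String.toList_inj.mp (by rw [hheadL, h12]; decide)
      simp [h12, this]
    -- no word matches: A returns the default; B's chain falls through to the wildcard
    have hneq : ∀ (w : List Char) (s : String), s.toList = w → h ≠ w → head ≠ s := by
      intro w str hs hw he
      exact hw (by rw [← hs, ← he, hheadL])
    simp [h1, h2, h3, h4, h5, h6, h7, h8, h9, h10, h11, h12,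
      hneq _ "fig" (by decide) h1, hneq _ "tab" (by decide) h2,
      hneq _ "eq" (by decide) h3, hneq _ "sec" (by decide) h4,
      hneq _ "subsec" (by decide) h5, hneq _ "chap" (by decide) h6,
      hneq _ "thm" (by decide) h7, hneq _ "lem" (by decide) h8,
      hneq _ "prop" (by decide) h9, hneq _ "def" (by decide) h10,
      hneq _ "cor" (by decide) h11, hneq _ "alg" (by decide) h12]

-- ===== VERDICT (by name: the statement is the Claim_ definition above) =====
theorem detect_label_kind_py_spec : Claim_equal_detect_label_kind_py := by
  intro key _
  exact detect_label_kind_eq key
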